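-- pv_equiv track=rewrite | github.com/PutchakayalaPrasad/agpl-whatsapp-bot | data/app/api.py | extract_bracket_section
-- ===== SOURCE A (Python) =====
-- def extract_bracket_section(text, section):
--     section = section.lower().strip()
--     lines = text.splitlines()
--
--     collecting = False
--     result = []
--
--     for line in lines:
--         clean = line.strip().lower()
--
--         if clean.startswith("[") and clean.endswith("]"):
--             header = clean.strip("[]").strip()
--             if header == section:
--                 collecting = True
--                 continue
--             elif collecting:
--                 break
--
--         if collecting:
--             result.append(line)
--
--     output = "\n".join(result).strip()
--     return output if output else "No information available for this topic."
-- ===== SOURCE B (Python) =====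
-- def extract_bracket_section(text, section):
--     sections = {}
--     current = None
--     for line in text.splitlines():
--         clean = line.strip().lower()
--         if clean.startswith("[") and clean.endswith("]"):
--             current = clean.strip("[]").strip()
--             sections.setdefault(current, [])
--         elif current is not None:
--             sections[current].append(line)
--     output = "\n".join(sections.get(section.lower().strip(), [])).strip()
--     return output if output else "No information available for this topic."
-- ===== Notes on version B (the rewrite author's own statement) =====
-- stated objective: alternative
-- what changed: Replaces A's early-terminating collecting-flag state machine with a single pass that builds a header->lines index (dict with setdefault) and looks the requested section up afterwards; Pre_ excludes texts where the requested section's header appears more than once, a duplicate-key corner where A's first-block-only value and B's merge-all-blocks value are both defensible.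
-- outside the precondition, e.g. on extract_bracket_section('[a]\nx\n[b]\ny\n[a]\nz', 'a'): A returns 'x', B returns 'x\nz'
import Mathlib
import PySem

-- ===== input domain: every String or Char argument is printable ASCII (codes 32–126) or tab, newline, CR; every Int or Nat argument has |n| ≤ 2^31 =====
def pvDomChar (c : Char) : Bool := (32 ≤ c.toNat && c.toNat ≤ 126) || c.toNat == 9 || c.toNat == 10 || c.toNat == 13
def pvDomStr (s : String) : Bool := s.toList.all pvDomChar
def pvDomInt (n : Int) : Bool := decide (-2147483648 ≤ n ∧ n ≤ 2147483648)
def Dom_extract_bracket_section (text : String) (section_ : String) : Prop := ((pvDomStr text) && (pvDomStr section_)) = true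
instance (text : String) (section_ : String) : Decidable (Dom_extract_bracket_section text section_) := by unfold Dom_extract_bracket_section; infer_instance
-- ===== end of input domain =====

set_option maxHeartbeats 1000000


-- B replaces A's early-terminating collecting-flag state machine by one pass that builds a
-- header → lines index with setdefault and then looks the requested section up (objective: alternative).

-- ===== PORT A =====
-- A's for-loop with its break: state (collecting, result); returning result early models 'break'.
def pvALoop (sec : String) : List String → Bool → List String → List String
  | [], _, res => res
  | l :: ls, collecting, res =>
    let clean := PySem.Str.lower (PySem.Str.strip l)
    if PySem.Str.startswith clean "[" && PySem.Str.endswith clean "]" then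
      let header := PySem.Str.strip (PySem.Str.stripChars clean "[]")
      if header == sec then pvALoop sec ls true res
      else if collecting then res  -- break
      else pvALoop sec ls collecting res
    else if collecting then pvALoop sec ls collecting (res ++ [l])
    else pvALoop sec ls collecting res

-- "output if output else fallback"
def pvAFinish (res : List String) : String :=
  let output := PySem.Str.strip (PySem.Str.join "\n" res)
  if output == "" then "No information available for this topic." else output

def extract_bracket_section (text : String) (section_ : String) : String :=
  pvAFinish (pvALoop (PySem.Str.strip (PySem.Str.lower section_)) (PySem.Str.splitlines text) false [])

-- ===== PORT B =====
-- B's index-building pass: state (sections : dict, current : Option header).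
def pvBLoop : List String → PySem.Dict String (List String) → Option String →
    PySem.Dict String (List String)
  | [], d, _ => d
  | l :: ls, d, cur =>
    let clean := PySem.Str.lower (PySem.Str.strip l)
    if PySem.Str.startswith clean "[" && PySem.Str.endswith clean "]" then
      let name := PySem.Str.strip (PySem.Str.stripChars clean "[]")
      pvBLoop ls (d.setdefault name []) (some name)
    else
      match cur with
      | some c => pvBLoop ls (d.modify c [] (· ++ [l])) cur
      | none => pvBLoop ls d none

def extract_bracket_section_alt (text : String) (section_ : String) : String :=
  let output := PySem.Str.strip (PySem.Str.join "\n"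
    ((pvBLoop (PySem.Str.splitlines text) PySem.Dict.empty none).getD
      (PySem.Str.strip (PySem.Str.lower section_)) []))
  if output == "" then "No information available for this topic." else output

-- ===== PRECONDITION & SPEC =====
-- The header name of a line, if the (stripped, lowered) line is bracketed.
def pvHeaderOf? (l : String) : Option String :=
  if PySem.Str.startswith (PySem.Str.lower (PySem.Str.strip l)) "[" &&
      PySem.Str.endswith (PySem.Str.lower (PySem.Str.strip l)) "]" then
    some (PySem.Str.strip (PySem.Str.stripChars (PySem.Str.lower (PySem.Str.strip l)) "[]"))
  else none

def pvHdrs (ls : List String) : List String := ls.filterMap pvHeaderOf?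

-- Pre_ excludes texts in which the requested section's header appears MORE THAN ONCE: there A keeps
-- only the first block (stopping at the next header) while B merges all blocks of that name — a
-- duplicate-key corner on which either value is defensible.
def Pre_extract_bracket_section (text : String) (section_ : String) : Prop :=
  (pvHdrs (PySem.Str.splitlines text)).count (PySem.Str.strip (PySem.Str.lower section_)) ≤ 1
instance (text : String) (section_ : String) : Decidable (Pre_extract_bracket_section text section_) := by
  unfold Pre_extract_bracket_section; infer_instance

def pvWitness_extract_bracket_section : String × String := ("[info]\nhello there", "Info")

def Spec_extract_bracket_section (text : String) (section_ : String) (out : String) : Prop :=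
  out = extract_bracket_section_alt text section_
instance (text : String) (section_ : String) (out : String) : Decidable (Spec_extract_bracket_section text section_ out) := by
  unfold Spec_extract_bracket_section; infer_instance

-- ===== CLAIM =====
def Claim_equal_extract_bracket_section : Prop := ∀ (text : String) (section_ : String), Dom_extract_bracket_section text section_ → Pre_extract_bracket_section text section_ → Spec_extract_bracket_section text section_ (extract_bracket_section text section_)

-- ===== LEMMAS AND PROOFS =====

-- If key never occurs as a header in ls and is not the current header, B never touches key's entry.
theorem pvB_stable (key : String) : ∀ (ls : List String) (d : PySem.Dict String (List String))
    (cur : Option String), key ∉ pvHdrs ls → cur ≠ some key →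
    (pvBLoop ls d cur).getD key [] = d.getD key [] := by
  intro ls
  induction ls with
  | nil => intro d cur _ _; rfl
  | cons l ls ih =>
    intro d cur hk hne
    simp only [pvBLoop]
    by_cases hdr : (PySem.Str.startswith (PySem.Str.lower (PySem.Str.strip l)) "[" &&
        PySem.Str.endswith (PySem.Str.lower (PySem.Str.strip l)) "]") = true
    · rw [if_pos hdr]
      set nm := PySem.Str.strip (PySem.Str.stripChars (PySem.Str.lower (PySem.Str.strip l)) "[]") with hnm
      have hsome : pvHeaderOf? l = some nm := by
        unfold pvHeaderOf?; rw [if_pos hdr]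
      have hcons : pvHdrs (l :: ls) = nm :: pvHdrs ls := by
        unfold pvHdrs; rw [List.filterMap_cons, hsome]
      rw [hcons] at hk
      have hnk : nm ≠ key := fun h => hk (by simp [h])
      have hk' : key ∉ pvHdrs ls := fun h => hk (by simp [h])
      rw [ih _ _ hk' (by simp [hnk])]
      by_cases hcon : d.contains nm = true
      · rw [PySem.Dict.setdefault_of_contains _ _ hcon]
      · rw [PySem.Dict.setdefault_of_not_contains _ _ (by simpa using hcon),
          PySem.Dict.getD_insert_of_ne _ _ _ (Ne.symm hnk)]
    · rw [if_neg hdr]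
      have hnone : pvHeaderOf? l = none := by
        unfold pvHeaderOf?; rw [if_neg hdr]
      have hk' : key ∉ pvHdrs ls := by
        intro h
        exact hk (by unfold pvHdrs; rw [List.filterMap_cons, hnone]; exact h)
      cases cur with
      | none => exact ih d none hk' (by simp)
      | some c =>
        have hck : c ≠ key := fun h => hne (by rw [h])
        rw [ih _ _ hk' hne, PySem.Dict.getD_modify_of_ne _ _ _ (Ne.symm hck)]

-- While A is collecting (B's current header is the key) and key never recurs as a header,
-- B's entry at key tracks A's result.
theorem pvB_during (key : String) : ∀ (ls : List String) (d : PySem.Dict String (List String))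
    (res : List String), key ∉ pvHdrs ls → d.getD key [] = res →
    pvALoop key ls true res = (pvBLoop ls d (some key)).getD key [] := by
  intro ls
  induction ls with
  | nil => intro d res _ h; simpa [pvALoop, pvBLoop] using h.symm
  | cons l ls ih =>
    intro d res hk hres
    simp only [pvALoop, pvBLoop]
    by_cases hdr : (PySem.Str.startswith (PySem.Str.lower (PySem.Str.strip l)) "[" &&
        PySem.Str.endswith (PySem.Str.lower (PySem.Str.strip l)) "]") = true
    · rw [if_pos hdr, if_pos hdr]
      set nm := PySem.Str.strip (PySem.Str.stripChars (PySem.Str.lower (PySem.Str.strip l)) "[]") with hnm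
      have hsome : pvHeaderOf? l = some nm := by
        unfold pvHeaderOf?; rw [if_pos hdr]
      have hcons : pvHdrs (l :: ls) = nm :: pvHdrs ls := by
        unfold pvHdrs; rw [List.filterMap_cons, hsome]
      rw [hcons] at hk
      have hnk : nm ≠ key := fun h => hk (by simp [h])
      have hk' : key ∉ pvHdrs ls := fun h => hk (by simp [h])
      rw [if_neg (show ¬ (nm == key) = true by simp [hnk]), if_pos trivial,
        pvB_stable key ls _ _ hk' (by simp [hnk])]
      by_cases hcon : d.contains nm = true
      · rw [PySem.Dict.setdefault_of_contains _ _ hcon]; exact hres.symm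
      · rw [PySem.Dict.setdefault_of_not_contains _ _ (by simpa using hcon),
          PySem.Dict.getD_insert_of_ne _ _ _ (Ne.symm hnk)]
        exact hres.symm
    · rw [if_neg hdr, if_neg hdr, if_pos trivial]
      have hnone : pvHeaderOf? l = none := by
        unfold pvHeaderOf?; rw [if_neg hdr]
      have hk' : key ∉ pvHdrs ls := by
        intro h
        exact hk (by unfold pvHdrs; rw [List.filterMap_cons, hnone]; exact h)
      exact ih _ _ hk' (by rw [PySem.Dict.getD_modify_self, hres])

-- Before A starts collecting: key occurs at most once in the remaining headers, key not yet in the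
-- dict, current (if any) is a different header.
theorem pvB_before (key : String) : ∀ (ls : List String) (d : PySem.Dict String (List String))
    (cur : Option String), (pvHdrs ls).count key ≤ 1 → d.contains key = false →
    (∀ c, cur = some c → c ≠ key) →
    pvALoop key ls false [] = (pvBLoop ls d cur).getD key [] := by
  intro ls
  induction ls with
  | nil =>
    intro d cur _ hc _
    simp [pvALoop, pvBLoop, PySem.Dict.getD_of_not_contains _ _ hc]
  | cons l ls ih =>
    intro d cur hcnt hc hcur
    simp only [pvALoop, pvBLoop]
    by_cases hdr : (PySem.Str.startswith (PySem.Str.lower (PySem.Str.strip l)) "[" &&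
        PySem.Str.endswith (PySem.Str.lower (PySem.Str.strip l)) "]") = true
    · rw [if_pos hdr, if_pos hdr]
      set nm := PySem.Str.strip (PySem.Str.stripChars (PySem.Str.lower (PySem.Str.strip l)) "[]") with hnm
      have hsome : pvHeaderOf? l = some nm := by
        unfold pvHeaderOf?; rw [if_pos hdr]
      have hcons : pvHdrs (l :: ls) = nm :: pvHdrs ls := by
        unfold pvHdrs; rw [List.filterMap_cons, hsome]
      rw [hcons] at hcnt
      by_cases hk : nm = key
      · rw [if_pos (show (nm == key) = true by simp [hk])]
        have hnot : key ∉ pvHdrs ls := by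
          rw [hk, List.count_cons_self] at hcnt
          have h0 : List.count key (pvHdrs ls) = 0 := by omega
          simpa [List.count_eq_zero] using h0
        rw [hk, PySem.Dict.setdefault_of_not_contains _ _ hc]
        exact pvB_during key ls _ [] hnot (by simp [PySem.Dict.getD_insert_self])
      · rw [if_neg (show ¬ (nm == key) = true by simp [hk]), if_neg (by simp)]
        have hcnt' : (pvHdrs ls).count key ≤ 1 := by
          rw [List.count_cons] at hcnt; omega
        have hc' : ∀ d', d' = d.setdefault nm [] → d'.contains key = false := by
          intro d' hd'
          by_cases hcon : d.contains nm = true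
          · rw [hd', PySem.Dict.setdefault_of_contains _ _ hcon]; exact hc
          · rw [hd', PySem.Dict.setdefault_of_not_contains _ _ (by simpa using hcon),
              PySem.Dict.contains_insert]
            simp [hc]
            exact fun h => hk h.symm
        exact ih _ _ hcnt' (hc' _ rfl) (fun c h => fun hck => hk ((Option.some.inj h).trans hck))
    · rw [if_neg hdr, if_neg hdr, if_neg (by simp)]
      have hnone : pvHeaderOf? l = none := by
        unfold pvHeaderOf?; rw [if_neg hdr]
      have hcnt' : (pvHdrs ls).count key ≤ 1 := by
        have : pvHdrs (l :: ls) = pvHdrs ls := by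
          unfold pvHdrs; rw [List.filterMap_cons, hnone]
        rwa [this] at hcnt
      cases cur with
      | none => exact ih d none hcnt' hc (by simp)
      | some c =>
        have hck : c ≠ key := hcur c rfl
        refine ih _ _ hcnt' ?_ (fun c' h => fun h2 => hck ((Option.some.inj h).symm ▸ h2))
        rw [PySem.Dict.contains_modify]
        simp [hc, Ne.symm hck]

-- ===== VERDICT =====
theorem extract_bracket_section_spec : Claim_equal_extract_bracket_section := by
  intro text section_ _ hpre
  unfold Spec_extract_bracket_section extract_bracket_section extract_bracket_section_alt
  rw [pvB_before (PySem.Str.strip (PySem.Str.lower section_)) (PySem.Str.splitlines text)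
    PySem.Dict.empty none hpre (by simp) (by simp)]
  rfl
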